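-- pv_equiv track=rewrite | github.com/smsxgz/euler_project | problems/problem_73/Counting_fractions_in_a_range.py | inclusionExclusion
-- ===== SOURCE A (Python) =====
-- def inclusionExclusion(limit, index, primes):
--     q, r = divmod(limit, 6)
--     count = q * (3 * q - 2 + r) + (r == 5)
--     while index < len(primes) and 5 * primes[index] <= limit:
--         newLimit = limit // primes[index]
--         count -= inclusionExclusion(newLimit, index + 1, primes)
--         index += 1
--     return count
-- ===== SOURCE B (Python) =====
-- def inclusionExclusion(limit, index, primes):
--     # explicit stack of (limit, index, sign) frames replacing the recursion
--     total = 0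
--     stack = [(limit, index, 1)]
--     while stack:
--         lim, idx, sign = stack.pop()
--         q, r = divmod(lim, 6)
--         total += sign * (q * (3 * q - 2 + r) + (r == 5))
--         i = idx
--         while i < len(primes) and 5 * primes[i] <= lim:
--             stack.append((lim // primes[i], i + 1, -sign))
--             i += 1
--     return total
-- ===== Notes on version B (the rewrite author's own statement) =====
-- stated objective: alternative
-- what changed: Replaces the recursive signed inclusion-exclusion with an iterative explicit stack of (limit, index, sign) frames accumulated into a running total.
-- outside the precondition, e.g. on inclusionExclusion(6, -1, [2]): A returns 1, B returns 1; on inclusionExclusion(-1, 0, [0]): A returns 1, B returns 1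
import Mathlib
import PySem

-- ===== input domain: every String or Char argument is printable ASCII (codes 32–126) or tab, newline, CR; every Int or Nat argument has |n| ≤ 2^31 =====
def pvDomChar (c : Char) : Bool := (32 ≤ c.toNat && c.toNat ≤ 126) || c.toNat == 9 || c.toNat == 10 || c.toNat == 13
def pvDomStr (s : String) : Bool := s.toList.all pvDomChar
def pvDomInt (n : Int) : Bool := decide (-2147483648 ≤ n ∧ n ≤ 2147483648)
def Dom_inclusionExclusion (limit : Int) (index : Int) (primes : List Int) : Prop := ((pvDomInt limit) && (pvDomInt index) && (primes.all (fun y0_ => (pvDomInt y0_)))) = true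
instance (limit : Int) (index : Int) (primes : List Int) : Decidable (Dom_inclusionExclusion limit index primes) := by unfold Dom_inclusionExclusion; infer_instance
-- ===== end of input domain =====

-- B replaces A's recursion by an explicit stack of (limit, index, sign) frames; alternative decomposition, same cost.


-- ===== PORT A =====
-- A's while loop, transliterated: scan i upward while `i < len(primes) and 5*primes[i] <= limit`,
-- subtracting the recursive value supplied through `child` (the recursion one fuel level down).
def aLoop (primes : List Int) (limit : Int) (child : Int → Int → Int) (count : Int) (i : Int) : Int :=
  if _h : i < (primes.length : Int) then
    let p := (PySem.List.pyGet? primes i).getD 0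
    if 5 * p ≤ limit then
      aLoop primes limit child (count - child (PySem.Int.floordiv limit p) (i + 1)) (i + 1)
    else count
  else count
termination_by ((primes.length : Int) - i).toNat
decreasing_by omega

-- fuel bounds the recursion depth; it only skips the loop when exhausted (never reached under Pre_)
def aGo (primes : List Int) : Nat → Int → Int → Int
  | 0, limit, _ =>
    let q := PySem.Int.floordiv limit 6
    let r := PySem.Int.mod limit 6
    q * (3 * q - 2 + r) + (if r = 5 then 1 else 0)
  | f + 1, limit, index =>
    let q := PySem.Int.floordiv limit 6
    let r := PySem.Int.mod limit 6
    aLoop primes limit (aGo primes f) (q * (3 * q - 2 + r) + (if r = 5 then 1 else 0)) index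

def inclusionExclusion (limit : Int) (index : Int) (primes : List Int) : Int :=
  aGo primes (primes.length + 1) limit index

-- ===== PORT B =====
-- inner while of B: collects the frames pushed while scanning i upward (in push order)
def bScan (primes : List Int) (lim : Int) (sign : Int) (i : Int) : List (Int × Int × Int) :=
  if _h : i < (primes.length : Int) then
    let p := (PySem.List.pyGet? primes i).getD 0
    if 5 * p ≤ lim then
      (PySem.Int.floordiv lim p, i + 1, -sign) :: bScan primes lim sign (i + 1)
    else []
  else []
termination_by ((primes.length : Int) - i).toNat
decreasing_by omega

-- outer while of B: stack head = top (Python pops from the end, so pushed frames are prepended reversed)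
def bLoop (primes : List Int) : Nat → List (Int × Int × Int) → Int → Int
  | _, [], total => total
  | 0, _ :: _, total => total
  | f + 1, (lim, idx, sign) :: rest, total =>
    let q := PySem.Int.floordiv lim 6
    let r := PySem.Int.mod lim 6
    bLoop primes f ((bScan primes lim sign idx).reverse ++ rest)
      (total + sign * (q * (3 * q - 2 + r) + (if r = 5 then 1 else 0)))

def inclusionExclusion_alt (limit : Int) (index : Int) (primes : List Int) : Int :=
  bLoop primes (2 ^ (primes.length + 1)) [(limit, index, 1)] 0

-- ===== PRECONDITION & SPEC =====
-- Pre_ excludes negative start indices, where A's value comes from Python's accidental end-relative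
-- index wraparound (or an IndexError below -len), and lists containing 0, where A can raise
-- ZeroDivisionError; on the excluded inputs where A still returns, B returns the same value.
def Pre_inclusionExclusion (limit : Int) (index : Int) (primes : List Int) : Prop :=
  0 ≤ index ∧ (0 : Int) ∉ primes
instance (limit : Int) (index : Int) (primes : List Int) : Decidable (Pre_inclusionExclusion limit index primes) := by unfold Pre_inclusionExclusion; infer_instance

def pvWitness_inclusionExclusion : Int × Int × List Int := (30, 0, [2, 3, 5])

def Spec_inclusionExclusion (limit : Int) (index : Int) (primes : List Int) (out : Int) : Prop := out = inclusionExclusion_alt limit index primes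
instance (limit : Int) (index : Int) (primes : List Int) (out : Int) : Decidable (Spec_inclusionExclusion limit index primes out) := by unfold Spec_inclusionExclusion; infer_instance

-- ===== CLAIM (what is proved, stated in full; the proofs are below) =====
def Claim_equal_inclusionExclusion : Prop := ∀ (limit : Int) (index : Int) (primes : List Int), Dom_inclusionExclusion limit index primes → Pre_inclusionExclusion limit index primes → Spec_inclusionExclusion limit index primes (inclusionExclusion limit index primes)

-- ===== LEMMAS AND PROOFS =====

-- base value of a frame
def baseVal (lim : Int) : Int :=
  let q := PySem.Int.floordiv lim 6
  let r := PySem.Int.mod lim 6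
  q * (3 * q - 2 + r) + (if r = 5 then 1 else 0)

-- plain (unsigned) sum of the recursive values of a frame list
def childSum (v : Int → Int → Int) (frames : List (Int × Int × Int)) : Int :=
  (frames.map (fun fr => v fr.1 fr.2.1)).sum

-- signed sum of the recursive values of a frame list
def signedSum (v : Int → Int → Int) (frames : List (Int × Int × Int)) : Int :=
  (frames.map (fun fr => fr.2.2 * v fr.1 fr.2.1)).sum

-- potential of a stack: bounds the number of pops left
def stackMeasure (n : Nat) (frames : List (Int × Int × Int)) : Nat :=
  (frames.map (fun fr => 2 ^ ((n : Int) - fr.2.1).toNat)).sum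

theorem mem_bScan (primes : List Int) (lim sign i : Int) :
    ∀ fr ∈ bScan primes lim sign i, i < fr.2.1 ∧ fr.2.1 ≤ (primes.length : Int) ∧ fr.2.2 = -sign := by
  fun_induction bScan primes lim sign i with
  | case1 i h p hp ih =>
    intro fr hfr
    rcases List.mem_cons.mp hfr with h1 | h2
    · subst h1; refine ⟨?_, ?_, rfl⟩ <;> simp only [] <;> omega
    · have := ih fr h2; exact ⟨by omega, this.2.1, this.2.2⟩
  | case2 => simp
  | case3 => simp

theorem bScan_pos (primes : List Int) (lim sign i : Int)
    (h : i < (primes.length : Int)) (hp : 5 * (PySem.List.pyGet? primes i).getD 0 ≤ lim) :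
    bScan primes lim sign i
      = (PySem.Int.floordiv lim ((PySem.List.pyGet? primes i).getD 0), i + 1, -sign)
          :: bScan primes lim sign (i + 1) := by
  rw [bScan]; simp [h, hp]

theorem bScan_stop (primes : List Int) (lim sign i : Int)
    (h : i < (primes.length : Int)) (hp : ¬ 5 * (PySem.List.pyGet? primes i).getD 0 ≤ lim) :
    bScan primes lim sign i = [] := by
  rw [bScan]; simp [h, hp]

theorem bScan_end (primes : List Int) (lim sign i : Int) (h : ¬ i < (primes.length : Int)) :
    bScan primes lim sign i = [] := by
  rw [bScan]; simp [h]

theorem aLoop_pos (primes : List Int) (limit : Int) (child : Int → Int → Int) (count i : Int)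
    (h : i < (primes.length : Int)) (hp : 5 * (PySem.List.pyGet? primes i).getD 0 ≤ limit) :
    aLoop primes limit child count i
      = aLoop primes limit child
          (count - child (PySem.Int.floordiv limit ((PySem.List.pyGet? primes i).getD 0)) (i + 1))
          (i + 1) := by
  rw [aLoop]; simp [h, hp]

theorem aLoop_stop (primes : List Int) (limit : Int) (child : Int → Int → Int) (count i : Int)
    (h : i < (primes.length : Int)) (hp : ¬ 5 * (PySem.List.pyGet? primes i).getD 0 ≤ limit) :
    aLoop primes limit child count i = count := by
  rw [aLoop]; simp [h, hp]

theorem aLoop_end (primes : List Int) (limit : Int) (child : Int → Int → Int) (count i : Int)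
    (h : ¬ i < (primes.length : Int)) :
    aLoop primes limit child count i = count := by
  rw [aLoop]; simp [h]

theorem aLoop_eq_aux (primes : List Int) (limit : Int) (child : Int → Int → Int) (sign : Int) :
    ∀ n i count, ((primes.length : Int) - i).toNat ≤ n →
      aLoop primes limit child count i = count - childSum child (bScan primes limit sign i) := by
  intro n
  induction n with
  | zero =>
    intro i count hn
    have h : ¬ i < (primes.length : Int) := by omega
    rw [aLoop_end primes limit child count i h, bScan_end primes limit sign i h]
    simp [childSum]
  | succ n ihn =>
    intro i count hn
    by_cases h : i < (primes.length : Int)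
    · by_cases hp : 5 * (PySem.List.pyGet? primes i).getD 0 ≤ limit
      · rw [aLoop_pos primes limit child count i h hp, bScan_pos primes limit sign i h hp,
            ihn (i + 1) _ (by omega)]
        simp [childSum]
        ring
      · rw [aLoop_stop primes limit child count i h hp, bScan_stop primes limit sign i h hp]
        simp [childSum]
    · rw [aLoop_end primes limit child count i h, bScan_end primes limit sign i h]
      simp [childSum]

theorem aLoop_eq (primes : List Int) (limit : Int) (child : Int → Int → Int) (sign : Int) :
    ∀ i count, aLoop primes limit child count i = count - childSum child (bScan primes limit sign i) := by
  intro i count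
  exact aLoop_eq_aux primes limit child sign (((primes.length : Int) - i).toNat) i count le_rfl

theorem aGo_stable (primes : List Int) :
    ∀ f g limit index, ((primes.length : Int) - index).toNat < f →
      ((primes.length : Int) - index).toNat < g →
      aGo primes f limit index = aGo primes g limit index := by
  intro f
  induction f using Nat.strong_induction_on with
  | _ f IH =>
    intro g limit index hf hg
    match f, g with
    | 0, _ => omega
    | _, 0 => omega
    | f' + 1, g' + 1 =>
      simp only [aGo]
      rw [aLoop_eq primes limit (aGo primes f') 1 index,
          aLoop_eq primes limit (aGo primes g') 1 index]
      have hcs : childSum (aGo primes f') (bScan primes limit 1 index)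
          = childSum (aGo primes g') (bScan primes limit 1 index) := by
        simp only [childSum]
        refine congrArg List.sum (List.map_congr_left ?_)
        intro fr hfr
        have hb := mem_bScan primes limit 1 index fr hfr
        exact IH f' (Nat.lt_succ_self f') g' fr.1 fr.2.1 (by omega) (by omega)
      rw [hcs]

-- fuel-free value of A's recursion
def V (primes : List Int) (limit index : Int) : Int :=
  aGo primes (((primes.length : Int) - index).toNat + 1) limit index

theorem V_unfold (primes : List Int) (limit index sign : Int) :
    V primes limit index = baseVal limit - childSum (V primes) (bScan primes limit sign index) := by
  unfold V
  simp only [aGo]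
  rw [aLoop_eq primes limit (aGo primes (((primes.length : Int) - index).toNat)) sign index]
  have hcs : childSum (aGo primes (((primes.length : Int) - index).toNat)) (bScan primes limit sign index)
      = childSum (fun l j => aGo primes ((((primes.length : Int) - j).toNat) + 1) l j)
          (bScan primes limit sign index) := by
    simp only [childSum]
    refine congrArg List.sum (List.map_congr_left ?_)
    intro fr hfr
    have hb := mem_bScan primes limit sign index fr hfr
    exact aGo_stable primes _ _ fr.1 fr.2.1 (by omega) (by omega)
  rw [hcs]; rfl

theorem signedSum_bScan (primes : List Int) (lim sign i : Int) :
    signedSum (V primes) (bScan primes lim sign i) = -sign * childSum (V primes) (bScan primes lim sign i) := by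
  simp only [signedSum, childSum]
  rw [← List.sum_map_mul_left]
  refine congrArg List.sum (List.map_congr_left ?_)
  intro fr hfr
  rw [(mem_bScan primes lim sign i fr hfr).2.2]

theorem stackMeasure_bScan (primes : List Int) (lim sign : Int) :
    ∀ i, stackMeasure primes.length (bScan primes lim sign i) + 1 ≤ 2 ^ (((primes.length : Int) - i).toNat) := by
  intro i
  fun_induction bScan primes lim sign i with
  | case1 i h p hp ih =>
    simp only [stackMeasure, List.map_cons, List.sum_cons] at ih ⊢
    have hexp : (((primes.length : Int) - i).toNat) = (((primes.length : Int) - (i + 1)).toNat) + 1 := by omega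
    rw [hexp, pow_succ]
    omega
  | case2 i h hp =>
    simp only [stackMeasure, List.map_nil, List.sum_nil]
    exact Nat.one_le_two_pow
  | case3 i h =>
    simp only [stackMeasure, List.map_nil, List.sum_nil]
    exact Nat.one_le_two_pow

theorem bLoop_eq (primes : List Int) :
    ∀ f stack total, stackMeasure primes.length stack ≤ f →
      bLoop primes f stack total = total + signedSum (V primes) stack := by
  intro f
  induction f using Nat.strong_induction_on with
  | _ f IH =>
    intro stack total hm
    match f, stack with
    | _, [] => simp [bLoop, signedSum]
    | 0, (lim, idx, sign) :: rest =>
      exfalso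
      simp only [stackMeasure, List.map_cons, List.sum_cons] at hm
      have := Nat.one_le_two_pow (n := (((primes.length : Int) - idx).toNat))
      omega
    | f' + 1, (lim, idx, sign) :: rest =>
      simp only [stackMeasure, List.map_cons, List.sum_cons] at hm
      have hch := stackMeasure_bScan primes lim sign idx
      have hm' : stackMeasure primes.length ((bScan primes lim sign idx).reverse ++ rest) ≤ f' := by
        simp only [stackMeasure, List.map_append, List.sum_append, List.map_reverse,
          List.sum_reverse] at hch ⊢
        omega
      simp only [bLoop]
      rw [IH f' (Nat.lt_succ_self f') _ _ hm']
      have hsplit : signedSum (V primes) ((bScan primes lim sign idx).reverse ++ rest)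
          = signedSum (V primes) (bScan primes lim sign idx) + signedSum (V primes) rest := by
        simp [signedSum, List.map_append, List.map_reverse, List.sum_reverse]
      rw [hsplit, signedSum_bScan primes lim sign idx]
      have hV := V_unfold primes lim idx sign
      simp only [signedSum, List.map_cons, List.sum_cons]
      have hbase : baseVal lim =
          PySem.Int.floordiv lim 6 * (3 * PySem.Int.floordiv lim 6 - 2 + PySem.Int.mod lim 6)
            + (if PySem.Int.mod lim 6 = 5 then 1 else 0) := rfl
      rw [hV, hbase]
      ring

-- ===== VERDICT (by name: the statement is the Claim_ definition above) =====
theorem inclusionExclusion_spec : Claim_equal_inclusionExclusion := by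
  intro limit index primes _hdom hpre
  obtain ⟨hidx, -⟩ := hpre
  unfold Spec_inclusionExclusion inclusionExclusion inclusionExclusion_alt
  have hA : aGo primes (primes.length + 1) limit index = V primes limit index :=
    aGo_stable primes _ _ limit index (by omega) (by omega)
  have hmeas : stackMeasure primes.length [(limit, index, 1)] ≤ 2 ^ (primes.length + 1) := by
    simp only [stackMeasure, List.map_cons, List.map_nil, List.sum_cons, List.sum_nil]
    have : (((primes.length : Int) - index).toNat) ≤ primes.length + 1 := by omega
    have := Nat.pow_le_pow_right (by norm_num : 1 ≤ 2) this
    omega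
  have hs : (0 : Int) + signedSum (V primes) [(limit, index, 1)] = V primes limit index := by
    simp [signedSum]
  rw [hA, bLoop_eq primes _ _ _ hmeas, hs]
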